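-- pv_equiv track=rewrite | github.com/UNI-FIIS-BIC01/solucion-quinto-laboratorio | sustitucion.py | construir_diccionario_sustitucion
-- ===== SOURCE A (Python) =====
-- import string
--
-- VOCALES_MINUSCULAS = "aeiou"
--
-- def construir_diccionario_sustitucion(permutacion_vocales):
--     """
--
--     Genera un diccionario donde, de acuerdo permutacion_vocales, las claves son las letras del
--     mensaje original y los valores son los valores encriptados de cada letra.
--     Solo deben sustituirse las vocales de acuerdo a permutacion_vocales, las consonantes no deben
--     ser sustituidas.
--
--     :param permutacion_vocales: Cadena de caracteres, con una permutación de vocales. El orden de las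
--     vocales en la permutacion define la sustitucion de vocales en el diccionario resultante.
--     :return: Diccionario, con claves para letras mayusculas y minusculas.
--     """
--
--     lista_letras = string.ascii_lowercase
--     diccionario_sustitucion = {}
--
--     for letra_original in lista_letras:
--         if letra_original in VOCALES_MINUSCULAS:
--             letra_sustituta = permutacion_vocales[VOCALES_MINUSCULAS.index(letra_original)]
--         else:
--             letra_sustituta = letra_original
--
--         diccionario_sustitucion[letra_original] = letra_sustituta
--         diccionario_sustitucion[letra_original.upper()] = letra_sustituta.upper()
--
--     return diccionario_sustitucion
-- ===== SOURCE B (Python) =====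
-- import string
--
-- VOCALES_MINUSCULAS = "aeiou"
--
--
-- def construir_diccionario_sustitucion(permutacion_vocales):
--     # Pass 1: identity substitution for all 26 letters (lower and upper).
--     diccionario = {}
--     for letra in string.ascii_lowercase:
--         diccionario[letra] = letra
--         diccionario[letra.upper()] = letra.upper()
--     # Pass 2: patch only the vowels (direct indexing keeps the IndexError
--     # on permutations shorter than 5).
--     for i, vocal in enumerate(VOCALES_MINUSCULAS):
--         sustituta = permutacion_vocales[i]
--         diccionario[vocal] = sustituta
--         diccionario[vocal.upper()] = sustituta.upper()
--     return diccionario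
-- ===== Notes on version B (the rewrite author's own statement) =====
-- stated objective: alternative
-- what changed: Replaces A's single branching loop (vowel test + VOCALES.index lookup per letter) with two differently-shaped passes: an identity fill over all 26 letters, then a targeted overwrite of the five vowels by enumerate over the vowel string, with no membership test or index search.
import Mathlib
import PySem

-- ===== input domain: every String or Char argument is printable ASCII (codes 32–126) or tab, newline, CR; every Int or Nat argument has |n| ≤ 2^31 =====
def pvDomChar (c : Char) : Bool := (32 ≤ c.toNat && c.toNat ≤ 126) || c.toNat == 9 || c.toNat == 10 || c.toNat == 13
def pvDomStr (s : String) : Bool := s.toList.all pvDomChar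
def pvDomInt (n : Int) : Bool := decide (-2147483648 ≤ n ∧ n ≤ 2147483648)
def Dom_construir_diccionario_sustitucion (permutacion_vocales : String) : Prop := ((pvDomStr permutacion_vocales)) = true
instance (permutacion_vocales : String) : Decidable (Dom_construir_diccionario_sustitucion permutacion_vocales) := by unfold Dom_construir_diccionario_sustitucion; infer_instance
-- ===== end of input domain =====

-- B replaces A's single branching loop (vowel test + index lookup for every letter) with an
-- identity fill over all 26 letters followed by a targeted overwrite of the five vowels
-- (objective: alternative decomposition, same cost).
-- All keys and values of the Python dict are single ASCII characters, so both ports keep the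
-- dict on the `Char` side (PySem string primitives are defined over `List Char`; exact here)
-- and convert each entry to a 1-character `String` at the end.

-- ===== PORT A =====
def pvVOCALES : List Char := ['a', 'e', 'i', 'o', 'u']
def pvABC : List Char := ['a','b','c','d','e','f','g','h','i','j','k','l','m','n','o','p','q','r','s','t','u','v','w','x','y','z']
def pvLoopA (l : List Char) : List (Char × Char) :=
  (pvABC.foldl
    (fun (d : PySem.Dict Char Char) lo =>
      let ls : Char :=
        if lo ∈ pvVOCALES then
          match PySem.List.index? pvVOCALES lo with
          | some k =>
            match PySem.Chars.pyGet? l (k : Int) with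
            | some c => c | none => lo
          | none => lo
        else lo
      ((d.insert lo ls).insert (PySem.Chars.upperChar lo) (PySem.Chars.upperChar ls)))
    PySem.Dict.empty).items

def construir_diccionario_sustitucion (permutacion_vocales : String) : List (String × String) :=
  (pvLoopA permutacion_vocales.toList).map (fun kv => (String.ofList [kv.1], String.ofList [kv.2]))

-- ===== PORT B =====
def pvLoopB (l : List Char) : List (Char × Char) :=
  let d := pvABC.foldl
    (fun (d : PySem.Dict Char Char) c =>
      ((d.insert c c).insert (PySem.Chars.upperChar c) (PySem.Chars.upperChar c)))
    PySem.Dict.empty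
  ((PySem.List.enumerate pvVOCALES).foldl
    (fun (d : PySem.Dict Char Char) iv =>
      match PySem.Chars.pyGet? l iv.1 with
      | some s => ((d.insert iv.2 s).insert (PySem.Chars.upperChar iv.2) (PySem.Chars.upperChar s))
      | none => d)
    d).items

def construir_diccionario_sustitucion_alt (permutacion_vocales : String) : List (String × String) :=
  (pvLoopB permutacion_vocales.toList).map (fun kv => (String.ofList [kv.1], String.ofList [kv.2]))

-- ===== PRECONDITION & SPEC =====
-- A evaluates permutacion_vocales[0]..permutacion_vocales[4] and raises IndexError when the
-- permutation has fewer than 5 characters; B indexes the same positions and raises there too.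
-- Pre_ admits exactly the inputs on which A returns.
def Pre_construir_diccionario_sustitucion (permutacion_vocales : String) : Prop :=
  5 ≤ permutacion_vocales.toList.length
instance (permutacion_vocales : String) : Decidable (Pre_construir_diccionario_sustitucion permutacion_vocales) := by unfold Pre_construir_diccionario_sustitucion; infer_instance
def pvWitness_construir_diccionario_sustitucion : String := "uoiea"

def Spec_construir_diccionario_sustitucion (permutacion_vocales : String) (out : List (String × String)) : Prop := out = construir_diccionario_sustitucion_alt permutacion_vocales
instance (permutacion_vocales : String) (out : List (String × String)) : Decidable (Spec_construir_diccionario_sustitucion permutacion_vocales out) := by unfold Spec_construir_diccionario_sustitucion; infer_instance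

-- ===== CLAIM (what is proved, stated in full; the proofs are below) =====
def Claim_equal_construir_diccionario_sustitucion : Prop := ∀ (permutacion_vocales : String), Dom_construir_diccionario_sustitucion permutacion_vocales → Pre_construir_diccionario_sustitucion permutacion_vocales → Spec_construir_diccionario_sustitucion permutacion_vocales (construir_diccionario_sustitucion permutacion_vocales)

-- ===== LEMMAS AND PROOFS =====

def pvIdItems : List (Char × Char) := [('a','a'), ('A','A'), ('b','b'), ('B','B'), ('c','c'), ('C','C'), ('d','d'), ('D','D'), ('e','e'), ('E','E'), ('f','f'), ('F','F'), ('g','g'), ('G','G'), ('h','h'), ('H','H'), ('i','i'), ('I','I'), ('j','j'), ('J','J'), ('k','k'), ('K','K'), ('l','l'), ('L','L'), ('m','m'), ('M','M'), ('n','n'), ('N','N'), ('o','o'), ('O','O'), ('p','p'), ('P','P'), ('q','q'), ('Q','Q'), ('r','r'), ('R','R'), ('s','s'), ('S','S'), ('t','t'), ('T','T'), ('u','u'), ('U','U'), ('v','v'), ('V','V'), ('w','w'), ('W','W'), ('x','x'), ('X','X'), ('y','y'), ('Y','Y'), ('z','z'), ('Z','Z')]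
theorem foldl_double_insert {α : Type} (k1 k2 : α → Char) (v1 v2 : α → Char)
    (L : List α) (d : PySem.Dict Char Char) :
    L.foldl (fun d a => ((d.insert (k1 a) (v1 a)).insert (k2 a) (v2 a))) d =
      (L.flatMap (fun a => [(k1 a, v1 a), (k2 a, v2 a)])).foldl (fun d p => d.insert p.1 p.2) d := by
  induction L generalizing d with
  | nil => rfl
  | cons x xs ih => simp [List.foldl_cons, ih]
theorem items_foldl_pairs (P : List (Char × Char)) (d : PySem.Dict Char Char)
    (h1 : ∀ p ∈ P, d.contains p.1 = false) (h2 : (P.map Prod.fst).Nodup) :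
    (P.foldl (fun d p => d.insert p.1 p.2) d).items = d.items ++ P := by
  have := PySem.Dict.items_foldl_insert_fresh (l := P) (k := Prod.fst) (v := Prod.snd) (d := d) h1 h2
  simpa using this
theorem insert_mk_of_contains (L : List (Char × Char)) (k v : Char)
    (h : (PySem.Dict.mk L).contains k = true) :
    (PySem.Dict.mk L).insert k v = PySem.Dict.mk (L.map (fun p => if p.1 == k then (k, v) else p)) := by
  apply PySem.Dict.ext
  simp only [PySem.Dict.items_insert, h, if_true]


set_option maxRecDepth 100000 in
set_option maxHeartbeats 1000000 in
theorem LA_eval (c0 c1 c2 c3 c4 : Char) (rest : List Char) :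
    pvLoopA (c0 :: c1 :: c2 :: c3 :: c4 :: rest) = [('a',c0), ('A',PySem.Chars.upperChar c0), ('b','b'), ('B','B'), ('c','c'), ('C','C'), ('d','d'), ('D','D'), ('e',c1), ('E',PySem.Chars.upperChar c1), ('f','f'), ('F','F'), ('g','g'), ('G','G'), ('h','h'), ('H','H'), ('i',c2), ('I',PySem.Chars.upperChar c2), ('j','j'), ('J','J'), ('k','k'), ('K','K'), ('l','l'), ('L','L'), ('m','m'), ('M','M'), ('n','n'), ('N','N'), ('o',c3), ('O',PySem.Chars.upperChar c3), ('p','p'), ('P','P'), ('q','q'), ('Q','Q'), ('r','r'), ('R','R'), ('s','s'), ('S','S'), ('t','t'), ('T','T'), ('u',c4), ('U',PySem.Chars.upperChar c4), ('v','v'), ('V','V'), ('w','w'), ('W','W'), ('x','x'), ('X','X'), ('y','y'), ('Y','Y'), ('z','z'), ('Z','Z')] := by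
  have e0 : (c0 :: c1 :: c2 :: c3 :: c4 :: rest)[(0:Nat)]? = some c0 := rfl
  have e1 : (c0 :: c1 :: c2 :: c3 :: c4 :: rest)[(1:Nat)]? = some c1 := rfl
  have e2 : (c0 :: c1 :: c2 :: c3 :: c4 :: rest)[(2:Nat)]? = some c2 := rfl
  have e3 : (c0 :: c1 :: c2 :: c3 :: c4 :: rest)[(3:Nat)]? = some c3 := rfl
  have e4 : (c0 :: c1 :: c2 :: c3 :: c4 :: rest)[(4:Nat)]? = some c4 := rfl
  have ua : PySem.Chars.upperChar 'a' = 'A' := by decide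
  have ub : PySem.Chars.upperChar 'b' = 'B' := by decide
  have uc : PySem.Chars.upperChar 'c' = 'C' := by decide
  have ud : PySem.Chars.upperChar 'd' = 'D' := by decide
  have ue : PySem.Chars.upperChar 'e' = 'E' := by decide
  have uf : PySem.Chars.upperChar 'f' = 'F' := by decide
  have ug : PySem.Chars.upperChar 'g' = 'G' := by decide
  have uh : PySem.Chars.upperChar 'h' = 'H' := by decide
  have ui : PySem.Chars.upperChar 'i' = 'I' := by decide
  have uj : PySem.Chars.upperChar 'j' = 'J' := by decide
  have uk : PySem.Chars.upperChar 'k' = 'K' := by decide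
  have ul : PySem.Chars.upperChar 'l' = 'L' := by decide
  have um : PySem.Chars.upperChar 'm' = 'M' := by decide
  have un : PySem.Chars.upperChar 'n' = 'N' := by decide
  have uo : PySem.Chars.upperChar 'o' = 'O' := by decide
  have up : PySem.Chars.upperChar 'p' = 'P' := by decide
  have uq : PySem.Chars.upperChar 'q' = 'Q' := by decide
  have ur : PySem.Chars.upperChar 'r' = 'R' := by decide
  have us : PySem.Chars.upperChar 's' = 'S' := by decide
  have ut : PySem.Chars.upperChar 't' = 'T' := by decide
  have uu : PySem.Chars.upperChar 'u' = 'U' := by decide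
  have uv : PySem.Chars.upperChar 'v' = 'V' := by decide
  have uw : PySem.Chars.upperChar 'w' = 'W' := by decide
  have ux : PySem.Chars.upperChar 'x' = 'X' := by decide
  have uy : PySem.Chars.upperChar 'y' = 'Y' := by decide
  have uz : PySem.Chars.upperChar 'z' = 'Z' := by decide
  have ja : PySem.List.index? ['a','e','i','o','u'] 'a' = some 0 := by decide
  have je : PySem.List.index? ['a','e','i','o','u'] 'e' = some 1 := by decide
  have ji : PySem.List.index? ['a','e','i','o','u'] 'i' = some 2 := by decide
  have jo : PySem.List.index? ['a','e','i','o','u'] 'o' = some 3 := by decide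
  have ju : PySem.List.index? ['a','e','i','o','u'] 'u' = some 4 := by decide
  rw [pvLoopA, foldl_double_insert]
  rw [items_foldl_pairs _ _ (by intro p _; exact PySem.Dict.contains_empty p.1)
    (by simp only [pvABC, List.flatMap_cons, List.flatMap_nil, List.nil_append, List.cons_append,
          List.append_nil, List.map_cons, List.map_nil, ua, ub, uc, ud, ue, uf, ug, uh, ui, uj, uk, ul, um, un, uo, up, uq, ur, us, ut, uu, uv, uw, ux, uy, uz]; decide)]
  simp only [pvABC, List.flatMap_cons, List.flatMap_nil, List.nil_append, List.cons_append,
    List.append_nil, pvVOCALES, List.mem_cons, List.not_mem_nil, Char.reduceEq, or_false, false_or,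
    or_true, true_or, if_true, if_false, ite_true, ite_false, ja, je, ji, jo, ju,
    PySem.Chars.pyGet?_eq_listPyGet?, PySem.List.pyGet?_natCast, e0, e1, e2, e3, e4,
    PySem.Dict.empty, ua, ub, uc, ud, ue, uf, ug, uh, ui, uj, uk, ul, um, un, uo, up, uq, ur, us, ut, uu, uv, uw, ux, uy, uz]

set_option maxRecDepth 100000 in
set_option maxHeartbeats 1000000 in
theorem LB_eval (c0 c1 c2 c3 c4 : Char) (rest : List Char) :
    pvLoopB (c0 :: c1 :: c2 :: c3 :: c4 :: rest) = [('a',c0), ('A',PySem.Chars.upperChar c0), ('b','b'), ('B','B'), ('c','c'), ('C','C'), ('d','d'), ('D','D'), ('e',c1), ('E',PySem.Chars.upperChar c1), ('f','f'), ('F','F'), ('g','g'), ('G','G'), ('h','h'), ('H','H'), ('i',c2), ('I',PySem.Chars.upperChar c2), ('j','j'), ('J','J'), ('k','k'), ('K','K'), ('l','l'), ('L','L'), ('m','m'), ('M','M'), ('n','n'), ('N','N'), ('o',c3), ('O',PySem.Chars.upperChar c3), ('p','p'), ('P','P'), ('q','q'), ('Q','Q'), ('r','r'), ('R','R'), ('s','s'),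 ('S','S'), ('t','t'), ('T','T'), ('u',c4), ('U',PySem.Chars.upperChar c4), ('v','v'), ('V','V'), ('w','w'), ('W','W'), ('x','x'), ('X','X'), ('y','y'), ('Y','Y'), ('z','z'), ('Z','Z')] := by
  have e0 : (c0 :: c1 :: c2 :: c3 :: c4 :: rest)[(0:Nat)]? = some c0 := rfl
  have e1 : (c0 :: c1 :: c2 :: c3 :: c4 :: rest)[(1:Nat)]? = some c1 := rfl
  have e2 : (c0 :: c1 :: c2 :: c3 :: c4 :: rest)[(2:Nat)]? = some c2 := rfl
  have e3 : (c0 :: c1 :: c2 :: c3 :: c4 :: rest)[(3:Nat)]? = some c3 := rfl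
  have e4 : (c0 :: c1 :: c2 :: c3 :: c4 :: rest)[(4:Nat)]? = some c4 := rfl
  have n0 : PySem.List.pyGet? (c0 :: c1 :: c2 :: c3 :: c4 :: rest) ((0:Int)) = some c0 := by
    rw [show ((0:Int)) = ((0:Nat):Int) from rfl, PySem.List.pyGet?_natCast]; exact e0
  have n1 : PySem.List.pyGet? (c0 :: c1 :: c2 :: c3 :: c4 :: rest) ((1:Int)) = some c1 := by
    rw [show ((1:Int)) = ((1:Nat):Int) from rfl, PySem.List.pyGet?_natCast]; exact e1
  have n2 : PySem.List.pyGet? (c0 :: c1 :: c2 :: c3 :: c4 :: rest) ((2:Int)) = some c2 := by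
    rw [show ((2:Int)) = ((2:Nat):Int) from rfl, PySem.List.pyGet?_natCast]; exact e2
  have n3 : PySem.List.pyGet? (c0 :: c1 :: c2 :: c3 :: c4 :: rest) ((3:Int)) = some c3 := by
    rw [show ((3:Int)) = ((3:Nat):Int) from rfl, PySem.List.pyGet?_natCast]; exact e3
  have n4 : PySem.List.pyGet? (c0 :: c1 :: c2 :: c3 :: c4 :: rest) ((4:Int)) = some c4 := by
    rw [show ((4:Int)) = ((4:Nat):Int) from rfl, PySem.List.pyGet?_natCast]; exact e4
  have ua : PySem.Chars.upperChar 'a' = 'A' := by decide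
  have ub : PySem.Chars.upperChar 'b' = 'B' := by decide
  have uc : PySem.Chars.upperChar 'c' = 'C' := by decide
  have ud : PySem.Chars.upperChar 'd' = 'D' := by decide
  have ue : PySem.Chars.upperChar 'e' = 'E' := by decide
  have uf : PySem.Chars.upperChar 'f' = 'F' := by decide
  have ug : PySem.Chars.upperChar 'g' = 'G' := by decide
  have uh : PySem.Chars.upperChar 'h' = 'H' := by decide
  have ui : PySem.Chars.upperChar 'i' = 'I' := by decide
  have uj : PySem.Chars.upperChar 'j' = 'J' := by decide
  have uk : PySem.Chars.upperChar 'k' = 'K' := by decide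
  have ul : PySem.Chars.upperChar 'l' = 'L' := by decide
  have um : PySem.Chars.upperChar 'm' = 'M' := by decide
  have un : PySem.Chars.upperChar 'n' = 'N' := by decide
  have uo : PySem.Chars.upperChar 'o' = 'O' := by decide
  have up : PySem.Chars.upperChar 'p' = 'P' := by decide
  have uq : PySem.Chars.upperChar 'q' = 'Q' := by decide
  have ur : PySem.Chars.upperChar 'r' = 'R' := by decide
  have us : PySem.Chars.upperChar 's' = 'S' := by decide
  have ut : PySem.Chars.upperChar 't' = 'T' := by decide
  have uu : PySem.Chars.upperChar 'u' = 'U' := by decide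
  have uv : PySem.Chars.upperChar 'v' = 'V' := by decide
  have uw : PySem.Chars.upperChar 'w' = 'W' := by decide
  have ux : PySem.Chars.upperChar 'x' = 'X' := by decide
  have uy : PySem.Chars.upperChar 'y' = 'Y' := by decide
  have uz : PySem.Chars.upperChar 'z' = 'Z' := by decide
  have s1 : (PySem.Dict.mk [('a','a'), ('A','A'), ('b','b'), ('B','B'), ('c','c'), ('C','C'), ('d','d'), ('D','D'), ('e','e'), ('E','E'), ('f','f'), ('F','F'), ('g','g'), ('G','G'), ('h','h'), ('H','H'), ('i','i'), ('I','I'), ('j','j'), ('J','J'), ('k','k'), ('K','K'), ('l','l'), ('L','L'), ('m','m'), ('M','M'), ('n','n'), ('N','N'), ('o','o'), ('O','O'), ('p','p'), ('P','P'), ('q','q'), ('Q','Q'), ('r','r'), ('R','R'), ('s','s'), ('S','S'), ('t','t'), ('T','T'), ('u','u'), ('U','U'), ('v','v'), ('V','V'), ('w','w'), ('W','W'), ('x','x'), ('X','X'), ('y','y'), ('Y','Y'), ('z','z'), ('Z','Z')]).insert 'a' (c0) = PySem.Dict.mk [('a',c0), ('A','A'), ('b','b'), ('B','B'), ('c','c'),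 ('C','C'), ('d','d'), ('D','D'), ('e','e'), ('E','E'), ('f','f'), ('F','F'), ('g','g'), ('G','G'), ('h','h'), ('H','H'), ('i','i'), ('I','I'), ('j','j'), ('J','J'), ('k','k'), ('K','K'), ('l','l'), ('L','L'), ('m','m'), ('M','M'), ('n','n'), ('N','N'), ('o','o'), ('O','O'), ('p','p'), ('P','P'), ('q','q'), ('Q','Q'), ('r','r'), ('R','R'), ('s','s'), ('S','S'), ('t','t'), ('T','T'), ('u','u'), ('U','U'), ('v','v'), ('V','V'), ('w','w'), ('W','W'), ('x','x'), ('X','X'), ('y','y'), ('Y','Y'), ('z','z'), ('Z','Z')] := by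
    rw [insert_mk_of_contains _ _ _ (by simp only [PySem.Dict.contains_mk, List.any_cons, List.any_nil,
      Char.reduceBEq, Bool.or_false, Bool.false_or, Bool.or_true, Bool.true_or])]
    simp only [List.map_cons, List.map_nil, Char.reduceBEq, Bool.false_eq_true, eq_self_iff_true,
      if_true, if_false, reduceIte]
  have s2 : (PySem.Dict.mk [('a',c0), ('A','A'), ('b','b'), ('B','B'), ('c','c'), ('C','C'), ('d','d'), ('D','D'), ('e','e'), ('E','E'), ('f','f'), ('F','F'), ('g','g'), ('G','G'), ('h','h'), ('H','H'), ('i','i'), ('I','I'), ('j','j'), ('J','J'), ('k','k'), ('K','K'), ('l','l'), ('L','L'), ('m','m'), ('M','M'), ('n','n'), ('N','N'), ('o','o'), ('O','O'), ('p','p'), ('P','P'), ('q','q'), ('Q','Q'), ('r','r'), ('R','R'), ('s','s'), ('S','S'), ('t','t'), ('T','T'), ('u','u'), ('U','U'), ('v','v'), ('V','V'), ('w','w'), ('W','W'), ('x','x'), ('X','X'), ('y','y'), ('Y','Y'), ('z','z'), ('Z','Z')]).insert 'A' (PySem.Chars.upperChar c0) = PySem.Dict.mk [('a',c0), ('A',PySem.Chars.upperChar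 c0), ('b','b'), ('B','B'), ('c','c'), ('C','C'), ('d','d'), ('D','D'), ('e','e'), ('E','E'), ('f','f'), ('F','F'), ('g','g'), ('G','G'), ('h','h'), ('H','H'), ('i','i'), ('I','I'), ('j','j'), ('J','J'), ('k','k'), ('K','K'), ('l','l'), ('L','L'), ('m','m'), ('M','M'), ('n','n'), ('N','N'), ('o','o'), ('O','O'), ('p','p'), ('P','P'), ('q','q'), ('Q','Q'), ('r','r'), ('R','R'), ('s','s'), ('S','S'), ('t','t'), ('T','T'), ('u','u'), ('U','U'), ('v','v'), ('V','V'), ('w','w'), ('W','W'), ('x','x'), ('X','X'), ('y','y'), ('Y','Y'), ('z','z'), ('Z','Z')] := by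
    rw [insert_mk_of_contains _ _ _ (by simp only [PySem.Dict.contains_mk, List.any_cons, List.any_nil,
      Char.reduceBEq, Bool.or_false, Bool.false_or, Bool.or_true, Bool.true_or])]
    simp only [List.map_cons, List.map_nil, Char.reduceBEq, Bool.false_eq_true, eq_self_iff_true,
      if_true, if_false, reduceIte]
  have s3 : (PySem.Dict.mk [('a',c0), ('A',PySem.Chars.upperChar c0), ('b','b'), ('B','B'), ('c','c'), ('C','C'), ('d','d'), ('D','D'), ('e','e'), ('E','E'), ('f','f'), ('F','F'), ('g','g'), ('G','G'), ('h','h'), ('H','H'), ('i','i'), ('I','I'), ('j','j'), ('J','J'), ('k','k'), ('K','K'), ('l','l'), ('L','L'), ('m','m'), ('M','M'), ('n','n'), ('N','N'), ('o','o'), ('O','O'), ('p','p'), ('P','P'), ('q','q'), ('Q','Q'), ('r','r'), ('R','R'), ('s','s'), ('S','S'), ('t','t'), ('T','T'), ('u','u'), ('U','U'), ('v','v'), ('V','V'), ('w','w'), ('W','W'), ('x','x'), ('X','X'), ('y','y'), ('Y','Y'), ('z','z'), ('Z','Z')]).insert 'e' (c1) = PySem.Dict.mk [('a',c0), ('A',PySem.Chars.upperChar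 c0), ('b','b'), ('B','B'), ('c','c'), ('C','C'), ('d','d'), ('D','D'), ('e',c1), ('E','E'), ('f','f'), ('F','F'), ('g','g'), ('G','G'), ('h','h'), ('H','H'), ('i','i'), ('I','I'), ('j','j'), ('J','J'), ('k','k'), ('K','K'), ('l','l'), ('L','L'), ('m','m'), ('M','M'), ('n','n'), ('N','N'), ('o','o'), ('O','O'), ('p','p'), ('P','P'), ('q','q'), ('Q','Q'), ('r','r'), ('R','R'), ('s','s'), ('S','S'), ('t','t'), ('T','T'), ('u','u'), ('U','U'), ('v','v'), ('V','V'), ('w','w'), ('W','W'), ('x','x'), ('X','X'), ('y','y'), ('Y','Y'), ('z','z'), ('Z','Z')] := by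
    rw [insert_mk_of_contains _ _ _ (by simp only [PySem.Dict.contains_mk, List.any_cons, List.any_nil,
      Char.reduceBEq, Bool.or_false, Bool.false_or, Bool.or_true, Bool.true_or])]
    simp only [List.map_cons, List.map_nil, Char.reduceBEq, Bool.false_eq_true, eq_self_iff_true,
      if_true, if_false, reduceIte]
  have s4 : (PySem.Dict.mk [('a',c0), ('A',PySem.Chars.upperChar c0), ('b','b'), ('B','B'), ('c','c'), ('C','C'), ('d','d'), ('D','D'), ('e',c1), ('E','E'), ('f','f'), ('F','F'), ('g','g'), ('G','G'), ('h','h'), ('H','H'), ('i','i'), ('I','I'), ('j','j'), ('J','J'), ('k','k'), ('K','K'), ('l','l'), ('L','L'), ('m','m'), ('M','M'), ('n','n'), ('N','N'), ('o','o'), ('O','O'), ('p','p'), ('P','P'), ('q','q'), ('Q','Q'), ('r','r'), ('R','R'), ('s','s'), ('S','S'), ('t','t'), ('T','T'), ('u','u'), ('U','U'), ('v','v'), ('V','V'), ('w','w'), ('W','W'), ('x','x'), ('X','X'), ('y','y'), ('Y','Y'), ('z','z'), ('Z','Z')]).insert 'E' (PySem.Chars.upperChar c1) = PySem.Dict.mk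 [('a',c0), ('A',PySem.Chars.upperChar c0), ('b','b'), ('B','B'), ('c','c'), ('C','C'), ('d','d'), ('D','D'), ('e',c1), ('E',PySem.Chars.upperChar c1), ('f','f'), ('F','F'), ('g','g'), ('G','G'), ('h','h'), ('H','H'), ('i','i'), ('I','I'), ('j','j'), ('J','J'), ('k','k'), ('K','K'), ('l','l'), ('L','L'), ('m','m'), ('M','M'), ('n','n'), ('N','N'), ('o','o'), ('O','O'), ('p','p'), ('P','P'), ('q','q'), ('Q','Q'), ('r','r'), ('R','R'), ('s','s'), ('S','S'), ('t','t'), ('T','T'), ('u','u'), ('U','U'), ('v','v'), ('V','V'), ('w','w'), ('W','W'), ('x','x'), ('X','X'), ('y','y'), ('Y','Y'), ('z','z'), ('Z','Z')] := by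
    rw [insert_mk_of_contains _ _ _ (by simp only [PySem.Dict.contains_mk, List.any_cons, List.any_nil,
      Char.reduceBEq, Bool.or_false, Bool.false_or, Bool.or_true, Bool.true_or])]
    simp only [List.map_cons, List.map_nil, Char.reduceBEq, Bool.false_eq_true, eq_self_iff_true,
      if_true, if_false, reduceIte]
  have s5 : (PySem.Dict.mk [('a',c0), ('A',PySem.Chars.upperChar c0), ('b','b'), ('B','B'), ('c','c'), ('C','C'), ('d','d'), ('D','D'), ('e',c1), ('E',PySem.Chars.upperChar c1), ('f','f'), ('F','F'), ('g','g'), ('G','G'), ('h','h'), ('H','H'), ('i','i'), ('I','I'), ('j','j'), ('J','J'), ('k','k'), ('K','K'), ('l','l'), ('L','L'), ('m','m'), ('M','M'), ('n','n'), ('N','N'), ('o','o'), ('O','O'), ('p','p'), ('P','P'), ('q','q'), ('Q','Q'), ('r','r'), ('R','R'), ('s','s'), ('S','S'), ('t','t'), ('T','T'), ('u','u'), ('U','U'), ('v','v'), ('V','V'), ('w','w'), ('W','W'), ('x','x'), ('X','X'), ('y','y'), ('Y','Y'), ('z','z'), ('Z','Z')]).insert 'i' (c2) = PySem.Dict.mk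 [('a',c0), ('A',PySem.Chars.upperChar c0), ('b','b'), ('B','B'), ('c','c'), ('C','C'), ('d','d'), ('D','D'), ('e',c1), ('E',PySem.Chars.upperChar c1), ('f','f'), ('F','F'), ('g','g'), ('G','G'), ('h','h'), ('H','H'), ('i',c2), ('I','I'), ('j','j'), ('J','J'), ('k','k'), ('K','K'), ('l','l'), ('L','L'), ('m','m'), ('M','M'), ('n','n'), ('N','N'), ('o','o'), ('O','O'), ('p','p'), ('P','P'), ('q','q'), ('Q','Q'), ('r','r'), ('R','R'), ('s','s'), ('S','S'), ('t','t'), ('T','T'), ('u','u'), ('U','U'), ('v','v'), ('V','V'), ('w','w'), ('W','W'), ('x','x'), ('X','X'), ('y','y'), ('Y','Y'), ('z','z'), ('Z','Z')] := by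
    rw [insert_mk_of_contains _ _ _ (by simp only [PySem.Dict.contains_mk, List.any_cons, List.any_nil,
      Char.reduceBEq, Bool.or_false, Bool.false_or, Bool.or_true, Bool.true_or])]
    simp only [List.map_cons, List.map_nil, Char.reduceBEq, Bool.false_eq_true, eq_self_iff_true,
      if_true, if_false, reduceIte]
  have s6 : (PySem.Dict.mk [('a',c0), ('A',PySem.Chars.upperChar c0), ('b','b'), ('B','B'), ('c','c'), ('C','C'), ('d','d'), ('D','D'), ('e',c1), ('E',PySem.Chars.upperChar c1), ('f','f'), ('F','F'), ('g','g'), ('G','G'), ('h','h'), ('H','H'), ('i',c2), ('I','I'), ('j','j'), ('J','J'), ('k','k'), ('K','K'), ('l','l'), ('L','L'), ('m','m'), ('M','M'), ('n','n'), ('N','N'), ('o','o'), ('O','O'), ('p','p'), ('P','P'), ('q','q'), ('Q','Q'), ('r','r'), ('R','R'), ('s','s'), ('S','S'), ('t','t'), ('T','T'), ('u','u'), ('U','U'), ('v','v'), ('V','V'), ('w','w'), ('W','W'), ('x','x'), ('X','X'), ('y','y'), ('Y','Y'), ('z','z'), ('Z','Z')]).insert 'I' (PySem.Chars.upperChar c2)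 = PySem.Dict.mk [('a',c0), ('A',PySem.Chars.upperChar c0), ('b','b'), ('B','B'), ('c','c'), ('C','C'), ('d','d'), ('D','D'), ('e',c1), ('E',PySem.Chars.upperChar c1), ('f','f'), ('F','F'), ('g','g'), ('G','G'), ('h','h'), ('H','H'), ('i',c2), ('I',PySem.Chars.upperChar c2), ('j','j'), ('J','J'), ('k','k'), ('K','K'), ('l','l'), ('L','L'), ('m','m'), ('M','M'), ('n','n'), ('N','N'), ('o','o'), ('O','O'), ('p','p'), ('P','P'), ('q','q'), ('Q','Q'), ('r','r'), ('R','R'), ('s','s'), ('S','S'), ('t','t'), ('T','T'), ('u','u'), ('U','U'), ('v','v'), ('V','V'), ('w','w'), ('W','W'), ('x','x'), ('X','X'), ('y','y'), ('Y','Y'), ('z','z'), ('Z','Z')] := by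
    rw [insert_mk_of_contains _ _ _ (by simp only [PySem.Dict.contains_mk, List.any_cons, List.any_nil,
      Char.reduceBEq, Bool.or_false, Bool.false_or, Bool.or_true, Bool.true_or])]
    simp only [List.map_cons, List.map_nil, Char.reduceBEq, Bool.false_eq_true, eq_self_iff_true,
      if_true, if_false, reduceIte]
  have s7 : (PySem.Dict.mk [('a',c0), ('A',PySem.Chars.upperChar c0), ('b','b'), ('B','B'), ('c','c'), ('C','C'), ('d','d'), ('D','D'), ('e',c1), ('E',PySem.Chars.upperChar c1), ('f','f'), ('F','F'), ('g','g'), ('G','G'), ('h','h'), ('H','H'), ('i',c2), ('I',PySem.Chars.upperChar c2), ('j','j'), ('J','J'), ('k','k'), ('K','K'), ('l','l'), ('L','L'), ('m','m'), ('M','M'), ('n','n'), ('N','N'), ('o','o'), ('O','O'), ('p','p'), ('P','P'), ('q','q'), ('Q','Q'), ('r','r'), ('R','R'), ('s','s'), ('S','S'), ('t','t'), ('T','T'), ('u','u'), ('U','U'), ('v','v'), ('V','V'), ('w','w'), ('W','W'), ('x','x'), ('X','X'), ('y','y'), ('Y','Y'), ('z','z'), ('Z','Z')]).insert 'o' (c3)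 = PySem.Dict.mk [('a',c0), ('A',PySem.Chars.upperChar c0), ('b','b'), ('B','B'), ('c','c'), ('C','C'), ('d','d'), ('D','D'), ('e',c1), ('E',PySem.Chars.upperChar c1), ('f','f'), ('F','F'), ('g','g'), ('G','G'), ('h','h'), ('H','H'), ('i',c2), ('I',PySem.Chars.upperChar c2), ('j','j'), ('J','J'), ('k','k'), ('K','K'), ('l','l'), ('L','L'), ('m','m'), ('M','M'), ('n','n'), ('N','N'), ('o',c3), ('O','O'), ('p','p'), ('P','P'), ('q','q'), ('Q','Q'), ('r','r'), ('R','R'), ('s','s'), ('S','S'), ('t','t'), ('T','T'), ('u','u'), ('U','U'), ('v','v'), ('V','V'), ('w','w'), ('W','W'), ('x','x'), ('X','X'), ('y','y'), ('Y','Y'), ('z','z'), ('Z','Z')] := by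
    rw [insert_mk_of_contains _ _ _ (by simp only [PySem.Dict.contains_mk, List.any_cons, List.any_nil,
      Char.reduceBEq, Bool.or_false, Bool.false_or, Bool.or_true, Bool.true_or])]
    simp only [List.map_cons, List.map_nil, Char.reduceBEq, Bool.false_eq_true, eq_self_iff_true,
      if_true, if_false, reduceIte]
  have s8 : (PySem.Dict.mk [('a',c0), ('A',PySem.Chars.upperChar c0), ('b','b'), ('B','B'), ('c','c'), ('C','C'), ('d','d'), ('D','D'), ('e',c1), ('E',PySem.Chars.upperChar c1), ('f','f'), ('F','F'), ('g','g'), ('G','G'), ('h','h'), ('H','H'), ('i',c2), ('I',PySem.Chars.upperChar c2), ('j','j'), ('J','J'), ('k','k'), ('K','K'), ('l','l'), ('L','L'), ('m','m'), ('M','M'), ('n','n'), ('N','N'), ('o',c3), ('O','O'), ('p','p'), ('P','P'), ('q','q'), ('Q','Q'), ('r','r'), ('R','R'), ('s','s'), ('S','S'), ('t','t'), ('T','T'), ('u','u'), ('U','U'), ('v','v'), ('V','V'), ('w','w'), ('W','W'), ('x','x'), ('X','X'), ('y','y'), ('Y','Y'), ('z','z'), ('Z','Z')]).insert 'O' (PySem.Chars.upperChar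 c3) = PySem.Dict.mk [('a',c0), ('A',PySem.Chars.upperChar c0), ('b','b'), ('B','B'), ('c','c'), ('C','C'), ('d','d'), ('D','D'), ('e',c1), ('E',PySem.Chars.upperChar c1), ('f','f'), ('F','F'), ('g','g'), ('G','G'), ('h','h'), ('H','H'), ('i',c2), ('I',PySem.Chars.upperChar c2), ('j','j'), ('J','J'), ('k','k'), ('K','K'), ('l','l'), ('L','L'), ('m','m'), ('M','M'), ('n','n'), ('N','N'), ('o',c3), ('O',PySem.Chars.upperChar c3), ('p','p'), ('P','P'), ('q','q'), ('Q','Q'), ('r','r'), ('R','R'), ('s','s'), ('S','S'), ('t','t'), ('T','T'), ('u','u'), ('U','U'), ('v','v'), ('V','V'), ('w','w'), ('W','W'), ('x','x'), ('X','X'), ('y','y'), ('Y','Y'), ('z','z'), ('Z','Z')] := by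
    rw [insert_mk_of_contains _ _ _ (by simp only [PySem.Dict.contains_mk, List.any_cons, List.any_nil,
      Char.reduceBEq, Bool.or_false, Bool.false_or, Bool.or_true, Bool.true_or])]
    simp only [List.map_cons, List.map_nil, Char.reduceBEq, Bool.false_eq_true, eq_self_iff_true,
      if_true, if_false, reduceIte]
  have s9 : (PySem.Dict.mk [('a',c0), ('A',PySem.Chars.upperChar c0), ('b','b'), ('B','B'), ('c','c'), ('C','C'), ('d','d'), ('D','D'), ('e',c1), ('E',PySem.Chars.upperChar c1), ('f','f'), ('F','F'), ('g','g'), ('G','G'), ('h','h'), ('H','H'), ('i',c2), ('I',PySem.Chars.upperChar c2), ('j','j'), ('J','J'), ('k','k'), ('K','K'), ('l','l'), ('L','L'), ('m','m'), ('M','M'), ('n','n'), ('N','N'), ('o',c3), ('O',PySem.Chars.upperChar c3), ('p','p'), ('P','P'), ('q','q'), ('Q','Q'), ('r','r'), ('R','R'), ('s','s'), ('S','S'), ('t','t'), ('T','T'), ('u','u'), ('U','U'), ('v','v'), ('V','V'), ('w','w'), ('W','W'), ('x','x'), ('X','X'), ('y','y'), ('Y','Y'), ('z','z'), ('Z','Z')]).insert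 'u' (c4) = PySem.Dict.mk [('a',c0), ('A',PySem.Chars.upperChar c0), ('b','b'), ('B','B'), ('c','c'), ('C','C'), ('d','d'), ('D','D'), ('e',c1), ('E',PySem.Chars.upperChar c1), ('f','f'), ('F','F'), ('g','g'), ('G','G'), ('h','h'), ('H','H'), ('i',c2), ('I',PySem.Chars.upperChar c2), ('j','j'), ('J','J'), ('k','k'), ('K','K'), ('l','l'), ('L','L'), ('m','m'), ('M','M'), ('n','n'), ('N','N'), ('o',c3), ('O',PySem.Chars.upperChar c3), ('p','p'), ('P','P'), ('q','q'), ('Q','Q'), ('r','r'), ('R','R'), ('s','s'), ('S','S'), ('t','t'), ('T','T'), ('u',c4), ('U','U'), ('v','v'), ('V','V'), ('w','w'), ('W','W'), ('x','x'), ('X','X'), ('y','y'), ('Y','Y'), ('z','z'), ('Z','Z')] := by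
    rw [insert_mk_of_contains _ _ _ (by simp only [PySem.Dict.contains_mk, List.any_cons, List.any_nil,
      Char.reduceBEq, Bool.or_false, Bool.false_or, Bool.or_true, Bool.true_or])]
    simp only [List.map_cons, List.map_nil, Char.reduceBEq, Bool.false_eq_true, eq_self_iff_true,
      if_true, if_false, reduceIte]
  have s10 : (PySem.Dict.mk [('a',c0), ('A',PySem.Chars.upperChar c0), ('b','b'), ('B','B'), ('c','c'), ('C','C'), ('d','d'), ('D','D'), ('e',c1), ('E',PySem.Chars.upperChar c1), ('f','f'), ('F','F'), ('g','g'), ('G','G'), ('h','h'), ('H','H'), ('i',c2), ('I',PySem.Chars.upperChar c2), ('j','j'), ('J','J'), ('k','k'), ('K','K'), ('l','l'), ('L','L'), ('m','m'), ('M','M'), ('n','n'), ('N','N'), ('o',c3), ('O',PySem.Chars.upperChar c3), ('p','p'), ('P','P'), ('q','q'), ('Q','Q'), ('r','r'), ('R','R'), ('s','s'), ('S','S'), ('t','t'), ('T','T'), ('u',c4), ('U','U'), ('v','v'), ('V','V'), ('w','w'), ('W','W'), ('x','x'), ('X','X'), ('y','y'), ('Y','Y'), ('z','z'), ('Z','Z')]).insert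 'U' (PySem.Chars.upperChar c4) = PySem.Dict.mk [('a',c0), ('A',PySem.Chars.upperChar c0), ('b','b'), ('B','B'), ('c','c'), ('C','C'), ('d','d'), ('D','D'), ('e',c1), ('E',PySem.Chars.upperChar c1), ('f','f'), ('F','F'), ('g','g'), ('G','G'), ('h','h'), ('H','H'), ('i',c2), ('I',PySem.Chars.upperChar c2), ('j','j'), ('J','J'), ('k','k'), ('K','K'), ('l','l'), ('L','L'), ('m','m'), ('M','M'), ('n','n'), ('N','N'), ('o',c3), ('O',PySem.Chars.upperChar c3), ('p','p'), ('P','P'), ('q','q'), ('Q','Q'), ('r','r'), ('R','R'), ('s','s'), ('S','S'), ('t','t'), ('T','T'), ('u',c4), ('U',PySem.Chars.upperChar c4), ('v','v'), ('V','V'), ('w','w'), ('W','W'), ('x','x'), ('X','X'), ('y','y'), ('Y','Y'), ('z','z'), ('Z','Z')] := by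
    rw [insert_mk_of_contains _ _ _ (by simp only [PySem.Dict.contains_mk, List.any_cons, List.any_nil,
      Char.reduceBEq, Bool.or_false, Bool.false_or, Bool.or_true, Bool.true_or])]
    simp only [List.map_cons, List.map_nil, Char.reduceBEq, Bool.false_eq_true, eq_self_iff_true,
      if_true, if_false, reduceIte]
  unfold pvLoopB
  rw [foldl_double_insert]
  rw [show List.foldl (fun (d : PySem.Dict Char Char) p => d.insert p.1 p.2) PySem.Dict.empty
        (List.flatMap (fun a => [(a, a), (PySem.Chars.upperChar a, PySem.Chars.upperChar a)]) pvABC) =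
      PySem.Dict.mk pvIdItems from by decide]
  simp only [pvVOCALES, PySem.List.enumerate_cons, PySem.List.enumerate_nil, List.foldl_cons,
    List.foldl_nil, Int.reduceAdd, PySem.Chars.pyGet?_eq_listPyGet?, n0, n1, n2, n3, n4,
    pvIdItems, ua, ub, uc, ud, ue, uf, ug, uh, ui, uj, uk, ul, um, un, uo, up, uq, ur, us, ut, uu, uv, uw, ux, uy, uz, s1, s2, s3, s4, s5, s6, s7, s8, s9, s10]

theorem core (c0 c1 c2 c3 c4 : Char) (rest : List Char) :
    pvLoopA (c0 :: c1 :: c2 :: c3 :: c4 :: rest) = pvLoopB (c0 :: c1 :: c2 :: c3 :: c4 :: rest) :=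
  (LA_eval c0 c1 c2 c3 c4 rest).trans (LB_eval c0 c1 c2 c3 c4 rest).symm

-- ===== VERDICT (by name: the statement is the Claim_ definition above) =====
theorem construir_diccionario_sustitucion_spec : Claim_equal_construir_diccionario_sustitucion := by
  intro p _ hpre
  unfold Spec_construir_diccionario_sustitucion
  unfold Pre_construir_diccionario_sustitucion at hpre
  obtain ⟨c0, c1, c2, c3, c4, rest, hl⟩ :
      ∃ c0 c1 c2 c3 c4 rest, p.toList = c0 :: c1 :: c2 :: c3 :: c4 :: rest := by
    match h : p.toList with
    | c0 :: c1 :: c2 :: c3 :: c4 :: rest => exact ⟨c0, c1, c2, c3, c4, rest, rfl⟩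
    | [] | [_] | [_, _] | [_, _, _] | [_, _, _, _] => rw [h] at hpre; simp at hpre
  unfold construir_diccionario_sustitucion construir_diccionario_sustitucion_alt
  rw [hl]
  exact congrArg (fun l => l.map (fun kv : Char × Char => (String.ofList [kv.1], String.ofList [kv.2])))
    (core c0 c1 c2 c3 c4 rest)
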